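-- pv_equiv track=rewrite | github.com/carolinefreyer/RandomProjectionsThesis | plot_curves.py | interval_extract
-- ===== SOURCE A (Python) =====
-- def interval_extract(list):
--     length = len(list)
--     i = 0
--     while (i< length):
--         low = list[i]
--         while i <length-1 and list[i]+1 == list[i + 1]:
--             i += 1
--         high = list[i]
--         if (high - low >= 1):
--             yield [low, high]
--         elif (high - low == 1):
--             yield [low, ]
--             yield [high, ]
--         else:
--             yield [low, ]
--         i += 1
-- ===== SOURCE B (Python) =====
-- def interval_extract(list):
--     it = iter(list)
--     try:
--         lo = hi = next(it)
--     except StopIteration: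
--         return
--     for v in it:
--         if v == hi + 1:
--             hi = v
--         else:
--             yield [lo, hi] if hi > lo else [lo]
--             lo = hi = v
--     yield [lo, hi] if hi > lo else [lo]
-- ===== Notes on version B (the rewrite author's own statement) =====
-- stated objective: simpler
-- what changed: B is a single value-driven pass carrying the current run (lo, hi) and emitting an interval when the run breaks, instead of A's index-based outer while with a nested look-ahead while over list[i]/list[i+1].
import Mathlib
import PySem

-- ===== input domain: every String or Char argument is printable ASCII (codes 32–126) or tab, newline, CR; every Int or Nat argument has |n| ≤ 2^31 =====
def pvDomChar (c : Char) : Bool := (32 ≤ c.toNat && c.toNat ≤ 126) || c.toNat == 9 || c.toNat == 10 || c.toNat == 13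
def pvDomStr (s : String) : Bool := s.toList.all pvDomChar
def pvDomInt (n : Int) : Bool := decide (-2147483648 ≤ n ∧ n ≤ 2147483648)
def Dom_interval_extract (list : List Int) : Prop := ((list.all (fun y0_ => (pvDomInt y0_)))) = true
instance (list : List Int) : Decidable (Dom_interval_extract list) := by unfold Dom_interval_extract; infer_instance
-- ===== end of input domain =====

-- B is a single value-driven pass carrying the current run (lo, hi), instead of A's
-- index-based nested while-loops; same cost, simpler structure.  A is a generator;
-- the ports return the list of all yielded values.

-- ===== PORT A =====
-- Python's inner `while i < length-1 and list[i]+1 == list[i+1]: i += 1`.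
-- All indices accessed are in range (i < length throughout), so `l.getD i 0` is
-- exact for Python's `list[i]` here.
def advA (l : List Int) (i : Nat) : Nat :=
  if h : i < l.length - 1 ∧ l.getD i 0 + 1 = l.getD (i + 1) 0 then
    advA l (i + 1)
  else i
termination_by l.length - 1 - i
decreasing_by omega

-- needed for the termination of the outer loop below
theorem advA_ge (l : List Int) (i : Nat) : i ≤ advA l i := by
  rw [advA]
  split
  · exact Nat.le_trans (Nat.le_succ i) (advA_ge l (i + 1))
  · exact Nat.le_refl i
termination_by l.length - 1 - i
decreasing_by omega

-- Python's outer `while i < length:` loop; one iteration yields one interval and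
-- resumes at i = (inner-loop final index) + 1.  The branch chain is kept as in A
-- (the `elif high - low == 1` branch is transliterated although it is shadowed).
def loopA (l : List Int) (i : Nat) : List (List Int) :=
  if h : i < l.length then
    let low := l.getD i 0
    let j := advA l i
    let high := l.getD j 0
    (if high - low ≥ 1 then [[low, high]]
     else if high - low = 1 then [[low], [high]]
     else [[low]]) ++ loopA l (j + 1)
  else []
termination_by l.length - i
decreasing_by have := advA_ge l i; omega

def interval_extract (list : List Int) : List (List Int) := loopA list 0

-- ===== PORT B =====
-- B: one pass over the values; (lo, hi) is the run being built, flushed when the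
-- next value does not extend it, and once more at the end.
def pvFlush (lo hi : Int) : List Int := if hi > lo then [lo, hi] else [lo]

def loopB (lo hi : Int) : List Int → List (List Int)
  | [] => [pvFlush lo hi]
  | v :: rest => if v = hi + 1 then loopB lo v rest else pvFlush lo hi :: loopB v v rest

def interval_extract_alt (list : List Int) : List (List Int) :=
  match list with
  | [] => []
  | x :: rest => loopB x x rest

-- ===== PRECONDITION & SPEC =====
def Spec_interval_extract (list : List Int) (out : List (List Int)) : Prop := out = interval_extract_alt list
instance (list : List Int) (out : List (List Int)) : Decidable (Spec_interval_extract list out) := by unfold Spec_interval_extract; infer_instance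

-- ===== CLAIM (what is proved, stated in full; the proofs are below) =====
def Claim_equal_interval_extract : Prop := ∀ (list : List Int), Dom_interval_extract list → Spec_interval_extract list (interval_extract list)

-- ===== LEMMAS AND PROOFS =====

-- `runSplit low xs = (high, rest)`: the end value of the maximal consecutive run
-- starting at `low` and continuing into `xs`, and the remaining suffix.
def runSplit (low : Int) : List Int → Int × List Int
  | [] => (low, [])
  | x :: xs => if low + 1 = x then runSplit x xs else (low, x :: xs)

theorem runSplit_len (low : Int) (xs : List Int) : (runSplit low xs).2.length ≤ xs.length := by
  induction xs generalizing low with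
  | nil => simp [runSplit]
  | cons x xs ih =>
    simp only [runSplit]
    split
    · exact Nat.le_trans (ih x) (Nat.le_succ _)
    · simp

-- suffix-list formulation of A's loop
def listA : List Int → List (List Int)
  | [] => []
  | x :: xs =>
    let p := runSplit x xs
    (if p.1 - x ≥ 1 then [[x, p.1]]
     else if p.1 - x = 1 then [[x], [p.1]]
     else [[x]]) ++ listA p.2
termination_by l => l.length
decreasing_by have := runSplit_len x xs; simpa using Nat.lt_succ_of_le this

theorem emit_eq_flush (lo h : Int) :
    (if h - lo ≥ 1 then [[lo, h]] else if h - lo = 1 then [[lo], [h]] else [[lo]])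
      = [pvFlush lo h] := by
  unfold pvFlush
  split
  · rw [if_pos (by omega)]
  · next hlt => rw [if_neg (by omega), if_neg (by omega)]

theorem advA_runSplit (l : List Int) (i : Nat) (h : i < l.length) :
    runSplit (l.getD i 0) (l.drop (i + 1))
      = (l.getD (advA l i) 0, l.drop (advA l i + 1)) := by
  rw [advA]
  split
  · next hc =>
    obtain ⟨h1, h2⟩ := hc
    have hlt : i + 1 < l.length := by omega
    rw [List.drop_eq_getElem_cons hlt]
    have hg : l.getD (i + 1) 0 = l[i + 1] := List.getD_eq_getElem l 0 hlt
    simp only [runSplit]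
    rw [if_pos (by rw [← hg]; exact h2)]
    rw [← hg]
    exact advA_runSplit l (i + 1) hlt
  · next hc =>
    by_cases hend : i + 1 < l.length
    · have hne : l.getD i 0 + 1 ≠ l.getD (i + 1) 0 := by
        intro he; exact hc ⟨by omega, he⟩
      rw [List.drop_eq_getElem_cons hend]
      have hg : l.getD (i + 1) 0 = l[i + 1] := List.getD_eq_getElem l 0 hend
      simp only [runSplit]
      rw [if_neg (by rw [← hg]; exact hne), ← List.drop_eq_getElem_cons hend]
    · rw [List.drop_eq_nil_of_le (by omega)]
      simp [runSplit]
termination_by l.length - 1 - i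
decreasing_by omega

theorem loopA_eq_listA (l : List Int) (i : Nat) : loopA l i = listA (l.drop i) := by
  rw [loopA]
  split
  · next h =>
    have hj := advA_ge l i
    have hrs := advA_runSplit l i h
    have hg : l.getD i 0 = l[i] := List.getD_eq_getElem l 0 h
    have htl : loopA l (advA l i + 1) = listA (l.drop (advA l i + 1)) :=
      loopA_eq_listA l (advA l i + 1)
    rw [List.drop_eq_getElem_cons h, listA]
    simp only [hrs, ← hg, htl]
  · next h =>
    rw [List.drop_eq_nil_of_le (by omega)]
    simp [listA]
termination_by l.length - i
decreasing_by have := advA_ge l i; omega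

theorem loopB_eq (xs : List Int) (lo hi : Int) :
    loopB lo hi xs = pvFlush lo (runSplit hi xs).1 :: listA (runSplit hi xs).2 := by
  induction xs generalizing lo hi with
  | nil => simp [loopB, runSplit, listA]
  | cons v rest ih =>
    simp only [loopB, runSplit]
    by_cases hv : v = hi + 1
    · rw [if_pos hv, if_pos hv.symm, ih]
    · rw [if_neg hv, if_neg (fun he => hv he.symm), ih]
      simp only [listA]
      rw [emit_eq_flush]
      simp

theorem alt_eq_listA (l : List Int) : interval_extract_alt l = listA l := by
  cases l with
  | nil => simp [interval_extract_alt, listA]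
  | cons x xs =>
    show loopB x x xs = listA (x :: xs)
    rw [loopB_eq, listA]
    rw [emit_eq_flush]
    simp

-- ===== VERDICT (by name: the statement is the Claim_ definition above) =====
theorem interval_extract_spec : Claim_equal_interval_extract := by
  intro l _
  unfold Spec_interval_extract interval_extract
  rw [loopA_eq_listA, List.drop_zero, alt_eq_listA]
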